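-- pv_equiv track=rewrite | github.com/thiago-jvds/my_projects | software/programming/SAT_solver/SAT_solver.py | no_overscribed
-- ===== SOURCE A (Python) =====
-- def all_combinations(L, number):
--     """_summary_
--
--     Args:
--         L (_type_): _description_
--         number (_type_): _description_
--     """
--     # base case
--     if number == 0:
--         yield []
--
--     for i in range(len(L)):
--         for comb in all_combinations(L[i+1:], number-1):
--             yield [L[i]]+comb
--
-- def no_overscribed(student_preferences, room_capacities):
--     """
--     >>> no_overscribed({'Alice': ['basement', 'penthouse'],
--     ...                    'Bob': ['kitchen'],
--     ...                    'Charles': ['basement', 'kitchen'],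
--     ...                    'Dana': ['kitchen', 'penthouse', 'basement']},
--     ...                    {'basement': 1,
--     ...                    'kitchen': 2,
--     ...                    'penthouse': 4})
--     [[('Alice_basement', False), ('Charles_basement', False)], [('Alice_basement', False), ('Dana_basement', False)], [('Charles_basement', False), ('Dana_basement', False)], [('Bob_kitchen', False), ('Charles_kitchen', False), ('Dana_kitchen', False)]]
--     """
--     CNF3 = []
--
--     for room, capacity in room_capacities.items():
--         tmp = []
--
--         qual_studs = [student for student in student_preferences.keys() if room in student_preferences[student]]
--
--         for comb in all_combinations(qual_studs, capacity+1):
--             tmp2 = []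
--             for stud in comb:
--                 tmp2.append((stud+'_'+room, False))
--             tmp.append(tmp2)
--
--         CNF3 += tmp
--
--     return CNF3
-- ===== SOURCE B (Python) =====
-- def _combinations(studs, k):
--     """All k-element combinations of studs, in lexicographic (pick-or-skip) order."""
--     if k < 0:
--         return []
--     if k == 0:
--         return [[]]
--     if not studs:
--         return []
--     head, rest = studs[0], studs[1:]
--     return [[head] + c for c in _combinations(rest, k - 1)] + _combinations(rest, k)
--
-- def no_overscribed(student_preferences, room_capacities):
--     # One pass over the students builds room -> qualified students (insertion order),
--     # so the per-room scan of all students disappears.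
--     studs_by_room = {}
--     for student, prefs in student_preferences.items():
--         for room in dict.fromkeys(prefs):
--             studs_by_room.setdefault(room, []).append(student)
--     cnf = []
--     for room, capacity in room_capacities.items():
--         k = capacity + 1
--         if k < 0:
--             continue
--         for comb in _combinations(studs_by_room.get(room, []), k):
--             cnf.append([(stud + '_' + room, False) for stud in comb])
--     return cnf
-- ===== Notes on version B (the rewrite author's own statement) =====
-- stated objective: faster
-- what changed: B builds a room->qualified-students index in one pass over the students (replacing A's per-room scan of all students through their preference lists) and replaces A's slice-based recursive generator all_combinations with a pick-or-skip combination enumerator without per-level list slicing.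
import Mathlib
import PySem

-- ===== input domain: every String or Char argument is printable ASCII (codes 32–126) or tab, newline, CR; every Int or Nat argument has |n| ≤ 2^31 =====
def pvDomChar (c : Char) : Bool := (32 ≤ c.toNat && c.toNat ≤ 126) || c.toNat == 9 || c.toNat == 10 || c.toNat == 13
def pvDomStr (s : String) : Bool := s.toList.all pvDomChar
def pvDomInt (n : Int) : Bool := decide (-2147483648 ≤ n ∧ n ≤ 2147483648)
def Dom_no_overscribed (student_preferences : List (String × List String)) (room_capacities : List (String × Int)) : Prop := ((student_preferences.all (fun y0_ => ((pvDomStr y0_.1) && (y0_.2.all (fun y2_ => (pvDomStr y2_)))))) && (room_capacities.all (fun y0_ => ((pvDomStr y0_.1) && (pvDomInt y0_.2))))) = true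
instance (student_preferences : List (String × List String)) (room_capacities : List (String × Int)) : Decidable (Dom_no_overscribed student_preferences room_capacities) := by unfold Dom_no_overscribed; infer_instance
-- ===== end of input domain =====

-- B replaces A's per-room scan of all students by a one-pass room->students index and
-- A's slice-based recursive combination generator by a pick-or-skip enumerator without per-level slicing (objective: faster; measured).

-- ===== PORT A =====
-- all_combinations(L, number): when number == 0 yields [], then for each i in range(len(L))
-- yields [L[i]] + comb for comb in all_combinations(L[i+1:], number-1).
-- (L.getD i.1 default is L[i]: i ranges over range(len(L)), so it is always in range.)
def allComb (L : List String) (number : Int) : List (List String) :=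
  (if number = 0 then [[]] else []) ++
  (List.range L.length).attach.flatMap (fun i =>
    (allComb (L.drop (i.1 + 1)) (number - 1)).map (fun comb => L.getD i.1 default :: comb))
termination_by L.length
decreasing_by
  have := List.mem_range.mp i.2
  simp [List.length_drop]; omega

def no_overscribed (student_preferences : List (String × List String)) (room_capacities : List (String × Int)) : List (List (String × Bool)) :=
  -- the two dict parameters, decoded with Python-dict semantics
  let spd := PySem.Dict.ofList student_preferences
  let rcd := PySem.Dict.ofList room_capacities
  rcd.items.foldl (fun CNF3 item =>
    let room := item.1
    let capacity := item.2
    let qual_studs := spd.keys.filter (fun student => (spd.getD student []).contains room)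
    let tmp := (allComb qual_studs (capacity + 1)).foldl (fun tmp comb =>
        tmp ++ [comb.foldl (fun tmp2 stud => tmp2 ++ [(stud ++ "_" ++ room, false)]) []]) []
    CNF3 ++ tmp) []

-- ===== PORT B =====
-- _combinations(studs, k): pick-or-skip enumeration, lexicographic order.
def combsB (studs : List String) (k : Int) : List (List String) :=
  if k < 0 then []
  else if k = 0 then [[]]
  else match studs with
    | [] => []
    | head :: rest => (combsB rest (k - 1)).map (fun c => head :: c) ++ combsB rest k

def no_overscribed_alt (student_preferences : List (String × List String)) (room_capacities : List (String × Int)) : List (List (String × Bool)) :=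
  let spd := PySem.Dict.ofList student_preferences
  let rcd := PySem.Dict.ofList room_capacities
  -- one pass over the students: studs_by_room.setdefault(room, []).append(student)
  let studs_by_room := spd.items.foldl (fun d item =>
      (PySem.List.dedup item.2).foldl (fun d room => d.modify room [] (fun l => l ++ [item.1])) d)
    PySem.Dict.empty
  rcd.items.foldl (fun cnf item =>
    let room := item.1
    let k := item.2 + 1
    if k < 0 then cnf
    else cnf ++ (combsB (studs_by_room.getD room []) k).map (fun comb =>
      comb.map (fun stud => (stud ++ "_" ++ room, false)))) []

-- ===== PRECONDITION & SPEC =====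
def Spec_no_overscribed (student_preferences : List (String × List String)) (room_capacities : List (String × Int)) (out : List (List (String × Bool))) : Prop := out = no_overscribed_alt student_preferences room_capacities
instance (student_preferences : List (String × List String)) (room_capacities : List (String × Int)) (out : List (List (String × Bool))) : Decidable (Spec_no_overscribed student_preferences room_capacities out) := by unfold Spec_no_overscribed; infer_instance

-- ===== CLAIM (what is proved, stated in full; the proofs are below) =====
def Claim_equal_no_overscribed : Prop := ∀ (student_preferences : List (String × List String)) (room_capacities : List (String × Int)), Dom_no_overscribed student_preferences room_capacities → Spec_no_overscribed student_preferences room_capacities (no_overscribed student_preferences room_capacities)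

-- ===== LEMMAS AND PROOFS =====

theorem flatMapAttach {α β : Type} (l : List α) (g : α → List β) :
    l.attach.flatMap (fun s => g s.1) = l.flatMap g := by
  rw [show l.attach.flatMap (fun s => g s.1) = (l.attach.map Subtype.val).flatMap g from
    (List.flatMap_map ..).symm, List.attach_map_subtype_val]

theorem allComb_neg (L : List String) (n : Int) (h : n < 0) : allComb L n = [] := by
  rw [allComb]
  simp only [show ¬ n = 0 by omega, if_false, List.nil_append, List.flatMap_eq_nil_iff,
    List.mem_attach, List.map_eq_nil_iff, true_implies]
  intro i
  exact allComb_neg (L.drop (i.1 + 1)) (n - 1) (by omega)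
termination_by L.length
decreasing_by
  have := List.mem_range.mp i.2
  simp [List.length_drop]; omega

theorem allComb_zero (L : List String) : allComb L 0 = [[]] := by
  rw [allComb]
  have h : (List.range L.length).attach.flatMap (fun i =>
      (allComb (L.drop (i.1 + 1)) ((0:Int) - 1)).map (fun comb => L.getD i.1 default :: comb)) = [] := by
    simp only [List.flatMap_eq_nil_iff, List.mem_attach, List.map_eq_nil_iff, true_implies]
    intro i
    exact allComb_neg _ _ (by omega)
  rw [h]
  simp

theorem allComb_unfold (L : List String) (n : Int) (hn : ¬ n = 0) :
    allComb L n = (List.range L.length).flatMap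
      (fun i => (allComb (L.drop (i + 1)) (n - 1)).map (fun c => L.getD i default :: c)) := by
  rw [allComb]
  simp only [hn, if_false, List.nil_append]
  exact flatMapAttach (List.range L.length)
    (fun i => (allComb (L.drop (i + 1)) (n - 1)).map (fun c => L.getD i default :: c))

theorem allComb_cons (x : String) (xs : List String) (n : Int) (hn : ¬ n = 0) :
    allComb (x :: xs) n = (allComb xs (n - 1)).map (fun c => x :: c) ++ allComb xs n := by
  rw [allComb_unfold _ _ hn]
  conv_rhs => rw [allComb_unfold xs n hn]
  simp only [List.length_cons, List.range_succ_eq_map, List.flatMap_cons, List.flatMap_map,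
    List.drop_succ_cons, List.getD_cons_succ, List.getD_cons_zero, List.drop_zero,
    Nat.succ_eq_add_one]

theorem allComb_eq_combsB (L : List String) : ∀ n : Int, allComb L n = combsB L n := by
  induction L with
  | nil =>
    intro n
    rw [combsB]
    rcases lt_trichotomy n 0 with h | h | h
    · rw [allComb_neg _ _ h]; simp [h]
    · subst h; rw [allComb_zero]; simp
    · rw [allComb_unfold _ _ (by omega)]
      simp [show ¬ n < 0 by omega, show ¬ n = 0 by omega]
  | cons x xs ih =>
    intro n
    rcases lt_trichotomy n 0 with h | h | h
    · rw [allComb_neg _ _ h, combsB]; simp [h]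
    · subst h; rw [allComb_zero, combsB]; simp
    · rw [allComb_cons _ _ _ (by omega), combsB, ih, ih]
      simp [show ¬ n < 0 by omega, show ¬ n = 0 by omega]

theorem grouped_eq (room : String) (items : List (String × List String)) :
    (((items.flatMap (fun item => (PySem.List.dedup item.2).map (fun r => (r, item.1)))).filter
        (fun p => p.1 == room)).map (fun p => p.2))
      = (items.filter (fun p => p.2.contains room)).map (fun p => p.1) := by
  induction items with
  | nil => simp
  | cons it rest ih =>
    simp only [List.flatMap_cons, List.filter_append, List.map_append, List.filter_cons]
    rw [ih]
    have hhead : ((((PySem.List.dedup it.2).map (fun r => (r, it.1))).filter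
        (fun p => p.1 == room)).map (fun p => p.2))
        = if it.2.contains room then [it.1] else [] := by
      rw [List.filter_map]
      rw [show ((fun (p : String × String) => (p.1 == room)) ∘ fun r => (r, it.1))
            = (fun r => r == room) from rfl]
      rw [List.filter_beq, List.map_map, List.map_replicate]
      by_cases h : room ∈ it.2
      · have hmem : room ∈ PySem.List.dedup it.2 := (PySem.List.mem_dedup ..).mpr h
        rw [List.count_eq_one_of_mem (PySem.List.nodup_dedup ..) hmem]
        simp [h]
      · have hnm : room ∉ PySem.List.dedup it.2 := fun hc => h ((PySem.List.mem_dedup ..).mp hc)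
        rw [List.count_eq_zero_of_not_mem hnm]
        simp [h]
    rw [hhead]
    by_cases h : room ∈ it.2
    · simp [h]
    · simp [h]

theorem idx_getD (room : String) (items : List (String × List String)) :
    ((items.foldl (fun d item =>
        (PySem.List.dedup item.2).foldl (fun d r => d.modify r [] (fun l => l ++ [item.1])) d)
      PySem.Dict.empty).getD room [])
    = ((items.flatMap (fun item => (PySem.List.dedup item.2).map (fun r => (r, item.1)))).filter
        (fun p => p.1 == room)).map (fun p => p.2) := by
  have hinner : ∀ (item : String × List String) (d : PySem.Dict String (List String)),
      (PySem.List.dedup item.2).foldl (fun d r => d.modify r [] (fun l => l ++ [item.1])) d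
        = ((PySem.List.dedup item.2).map (fun r => (r, item.1))).foldl
            (fun d p => d.modify p.1 [] (fun l => l ++ [p.2])) d := by
    intro item d
    rw [List.foldl_map]
  have hflat : (items.foldl (fun d item =>
        (PySem.List.dedup item.2).foldl (fun d r => d.modify r [] (fun l => l ++ [item.1])) d)
      PySem.Dict.empty)
      = ((items.flatMap (fun item => (PySem.List.dedup item.2).map (fun r => (r, item.1)))).foldl
          (fun d p => d.modify p.1 [] (fun l => l ++ [p.2])) PySem.Dict.empty) := by
    rw [show (fun (d : PySem.Dict String (List String)) (item : String × List String) =>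
          (PySem.List.dedup item.2).foldl (fun d r => d.modify r [] (fun l => l ++ [item.1])) d)
        = (fun d item => ((PySem.List.dedup item.2).map (fun r => (r, item.1))).foldl
            (fun d p => d.modify p.1 [] (fun l => l ++ [p.2])) d) from
      funext fun d => funext fun item => hinner item d]
    rw [List.foldl_flatMap]
  rw [hflat, PySem.Dict.getD_foldl_modify_append]
  simp

theorem qual_eq_index (sp : List (String × List String)) (room : String) :
    (PySem.Dict.ofList sp).keys.filter
        (fun student => ((PySem.Dict.ofList sp).getD student []).contains room)
      = (((PySem.Dict.ofList sp).items.foldl (fun d item =>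
          (PySem.List.dedup item.2).foldl (fun d r => d.modify r [] (fun l => l ++ [item.1])) d)
        PySem.Dict.empty).getD room []) := by
  rw [idx_getD, grouped_eq]
  simp only [PySem.Dict.keys]
  rw [List.filter_map]
  refine congrArg _ (List.filter_congr ?_)
  intro p hp
  have hp' : (p.1, p.2) ∈ (PySem.Dict.ofList sp).items := by simpa using hp
  have : (PySem.Dict.ofList sp).getD p.1 [] = p.2 :=
    PySem.Dict.getD_of_mem_items _ hp' (PySem.Dict.nodup_keys_ofList ..) []
  simp [this]

theorem combsB_neg (L : List String) (k : Int) (h : k < 0) : combsB L k = [] := by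
  rw [combsB.eq_def]; simp [h]

theorem main_eq (sp : List (String × List String)) (rc : List (String × Int)) :
    no_overscribed sp rc = no_overscribed_alt sp rc := by
  unfold no_overscribed no_overscribed_alt
  dsimp only
  refine List.foldl_ext _ _ _ fun acc item _ => ?_
  simp only [PySem.List.foldl_append_singleton_eq_map]
  rw [qual_eq_index, allComb_eq_combsB]
  by_cases h : item.2 + 1 < 0
  · rw [if_pos h, combsB_neg _ _ h]; simp
  · rw [if_neg h]; simp

-- ===== VERDICT (by name: the statement is the Claim_ definition above) =====
theorem no_overscribed_spec : Claim_equal_no_overscribed := by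
  intro sp rc _
  unfold Spec_no_overscribed
  exact main_eq sp rc
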